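-- pv_equiv track=rewrite | github.com/tneoeo2/Algorithm-prac | baekjoon/P종이자르기.py | solution
-- ===== SOURCE A (Python) =====
-- def solution(M, N):
--     answer =0       #자른 횟수
--
--     for i in range(M):
--         if i > 0 :      #M과N의 길이가 1이 될때까지 자른다
--             answer += 1
--         for j in range(N):
--             if j > 0 :
--                 answer += 1
--
--     return answer
-- ===== SOURCE B (Python) =====
-- def solution(M, N):
--     # closed form: (M-1) vertical-strip cuts plus M*(N-1) cuts within strips,
--     # with empty ranges contributing nothing
--     return max(M - 1, 0) + max(M, 0) * max(N - 1, 0)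
-- ===== Notes on version B (the rewrite author's own statement) =====
-- stated objective: faster
-- what changed: Replaced the nested counting loops with the closed-form formula max(M-1,0) + max(M,0)*max(N-1,0) (= M*N-1 for positive M,N).
import Mathlib
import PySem

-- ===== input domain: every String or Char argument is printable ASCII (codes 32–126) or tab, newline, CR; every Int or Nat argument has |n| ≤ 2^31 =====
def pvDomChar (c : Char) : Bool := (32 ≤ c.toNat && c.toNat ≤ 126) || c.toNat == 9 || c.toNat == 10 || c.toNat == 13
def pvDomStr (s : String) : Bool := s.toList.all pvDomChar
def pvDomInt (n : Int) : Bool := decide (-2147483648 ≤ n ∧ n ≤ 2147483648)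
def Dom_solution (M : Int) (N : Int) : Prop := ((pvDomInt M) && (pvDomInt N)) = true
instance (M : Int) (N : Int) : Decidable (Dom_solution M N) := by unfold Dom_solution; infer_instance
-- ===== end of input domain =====

-- B replaces A's nested counting loops with an O(1) closed-form formula (faster).

-- ===== PORT A =====
def solution (M : Int) (N : Int) : Int :=
  (PySem.List.pyRange 0 M 1).foldl (fun answer i =>
    (PySem.List.pyRange 0 N 1).foldl (fun a j => if j > 0 then a + 1 else a)
      (if i > 0 then answer + 1 else answer)) 0

-- ===== PORT B =====
def solution_alt (M : Int) (N : Int) : Int :=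
  max (M - 1) 0 + max M 0 * max (N - 1) 0

-- ===== PRECONDITION & SPEC =====
def Spec_solution (M : Int) (N : Int) (out : Int) : Prop := out = solution_alt M N
instance (M : Int) (N : Int) (out : Int) : Decidable (Spec_solution M N out) := by unfold Spec_solution; infer_instance

-- ===== CLAIM (what is proved, stated in full; the proofs are below) =====
def Claim_equal_solution : Prop := ∀ (M : Int) (N : Int), Dom_solution M N → Spec_solution M N (solution M N)

-- ===== LEMMAS AND PROOFS =====

-- the inner loop of A over range(a, N) with 0 < a adds 1 per element
theorem pv_count (N : Int) : ∀ (n : Nat) (a c : Int), 0 < a → (N - a).toNat = n →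
    (PySem.List.pyRange a N 1).foldl (fun x j => if j > 0 then x + 1 else x) c = c + n := by
  intro n
  induction n with
  | zero =>
      intro a c ha hn
      rw [PySem.List.pyRange_one_eq_nil (by omega)]
      simp
  | succ m ih =>
      intro a c ha hn
      rw [PySem.List.pyRange_one_cons (by omega)]
      simp only [List.foldl, if_pos ha]
      rw [ih (a + 1) (c + 1) (by omega) (by omega)]
      push_cast; ring

-- the full inner loop of A adds exactly max (N-1) 0
theorem pv_inner (N c : Int) :
    (PySem.List.pyRange 0 N 1).foldl (fun x j => if j > 0 then x + 1 else x) c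
      = c + max (N - 1) 0 := by
  by_cases hN : N ≤ 0
  · rw [PySem.List.pyRange_one_eq_nil hN]; simp; omega
  · rw [PySem.List.pyRange_one_cons (show (0:Int) < N by omega)]
    simp only [List.foldl, if_neg (by omega : ¬ ((0:Int) > 0)), zero_add]
    rw [pv_count N (N - 1).toNat 1 c (by omega) (by omega)]
    omega

-- the outer loop of A over range(a, M) with 0 < a adds (1 + max (N-1) 0) per element
theorem pv_outer (M N : Int) : ∀ (n : Nat) (a c : Int), 0 < a → (M - a).toNat = n →
    (PySem.List.pyRange a M 1).foldl (fun answer i =>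
      (PySem.List.pyRange 0 N 1).foldl (fun x j => if j > 0 then x + 1 else x)
        (if i > 0 then answer + 1 else answer)) c
      = c + n * (1 + max (N - 1) 0) := by
  intro n
  induction n with
  | zero =>
      intro a c ha hn
      rw [PySem.List.pyRange_one_eq_nil (show M ≤ a by omega)]
      simp
  | succ m ih =>
      intro a c ha hn
      rw [PySem.List.pyRange_one_cons (show a < M by omega)]
      simp only [List.foldl, if_pos ha]
      rw [pv_inner, ih (a + 1) _ (by omega) (by omega)]
      push_cast; ring

-- ===== VERDICT (by name: the statement is the Claim_ definition above) =====
theorem solution_spec : Claim_equal_solution := by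
  intro M N _
  unfold Spec_solution solution solution_alt
  by_cases hM : M ≤ 0
  · rw [PySem.List.pyRange_one_eq_nil hM]
    have h1 : max (M - 1) 0 = 0 := by omega
    have h2 : max M 0 = 0 := by omega
    rw [h1, h2]; simp
  · rw [PySem.List.pyRange_one_cons (show (0:Int) < M by omega)]
    simp only [List.foldl, if_neg (by omega : ¬ ((0:Int) > 0)), zero_add]
    rw [pv_inner, pv_outer M N (M - 1).toNat 1 _ (by omega) (by omega)]
    have ht : (((M - 1).toNat : Int)) = M - 1 := by omega
    have h1 : max (M - 1) 0 = M - 1 := by omega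
    have h2 : max M 0 = M := by omega
    rw [ht, h1, h2]
    ring
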